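-- pv_equiv track=rewrite | github.com/jjsmartin/aoc2023 | src/day12_pt1.py | generate_replacements
-- ===== SOURCE A (Python) =====
-- def generate_replacements(conditions, known_chars = ['.', '#'], wildcard_char = '?'):
--
--     if wildcard_char not in conditions:
--         return [conditions]
--
--     else:
--         results = []
--         for char in known_chars:
--             replaced = conditions.replace(wildcard_char, char, 1)
--             results.extend(generate_replacements(replaced, known_chars, wildcard_char))
--
--     return results
-- ===== SOURCE B (Python) =====
-- def generate_replacements(conditions, known_chars = ['.', '#'], wildcard_char = '?'):
--     parts = conditions.split(wildcard_char)
--     combos = ['']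
--     for part in parts[1:]:
--         combos = [prefix + char + part for prefix in combos for char in known_chars]
--     return [parts[0] + combo for combo in combos]
-- ===== Notes on version B (the rewrite author's own statement) =====
-- stated objective: faster
-- what changed: replaces A's recursive one-wildcard-at-a-time replacement (a full substring scan and string rebuild at every node of the recursion tree) with a single split on the wildcard followed by an iterative Cartesian-product fold over the gaps
-- outside the precondition, e.g. on generate_replacements('abb', ['a'], 'ab'): A returns ['a'], B returns ['ab']
import Mathlib
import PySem

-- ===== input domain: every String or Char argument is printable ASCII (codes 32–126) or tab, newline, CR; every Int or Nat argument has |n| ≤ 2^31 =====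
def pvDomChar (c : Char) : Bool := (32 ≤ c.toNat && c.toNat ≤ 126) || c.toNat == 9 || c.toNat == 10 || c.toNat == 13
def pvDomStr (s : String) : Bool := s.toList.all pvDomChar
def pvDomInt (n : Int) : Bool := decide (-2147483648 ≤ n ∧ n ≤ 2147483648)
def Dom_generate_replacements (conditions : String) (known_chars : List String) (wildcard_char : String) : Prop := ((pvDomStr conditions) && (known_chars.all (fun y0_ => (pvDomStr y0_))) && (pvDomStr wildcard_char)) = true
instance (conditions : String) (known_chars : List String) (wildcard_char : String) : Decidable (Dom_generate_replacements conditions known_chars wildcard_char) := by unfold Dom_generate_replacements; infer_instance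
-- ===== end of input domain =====

-- B replaces A's recursive first-occurrence wildcard replacement with one split on the
-- wildcard plus an iterative Cartesian-product fold over the gaps (objective: simpler).


-- ===== PORT A =====
-- conditions.replace(wildcard_char, char, 1): hand-ported (PySem.Chars.replace has no count
-- argument); exact: replaces the FIRST occurrence found by Chars.find, for old = '' prepends.
def pvReplace1 (s old new : List Char) : List Char :=
  let i := PySem.Chars.find s old
  if i = -1 then s else s.take i.toNat ++ new ++ s.drop (i.toNat + old.length)

-- A's recursion is unbounded in general (it diverges when replacements re-create the
-- wildcard); fuel makes the same computation total. Under Pre_ each recursive step removes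
-- one occurrence of the single wildcard character, so length+1 fuel is never exhausted.
def pvGoA (kcl : List (List Char)) (wcl : List Char) : Nat → List Char → List (List Char)
  | 0, _ => []
  | fuel+1, conds =>
    if PySem.Chars.isIn wcl conds = false then [conds]
    else kcl.foldl (fun results ch => results ++ pvGoA kcl wcl fuel (pvReplace1 conds wcl ch)) []

def generate_replacements (conditions : String) (known_chars : List String) (wildcard_char : String) : List String :=
  (pvGoA (known_chars.map String.toList) wildcard_char.toList
      (conditions.toList.length + 1) conditions.toList).map (fun l => String.ofList l)

-- ===== PORT B =====
def generate_replacements_alt (conditions : String) (known_chars : List String) (wildcard_char : String) : List String :=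
  match PySem.Chars.split? conditions.toList wildcard_char.toList with
  | none => []   -- conditions.split('') raises ValueError; excluded by Pre_
  | some parts =>
    let kcl := known_chars.map String.toList
    let combos := (parts.drop 1).foldl
      (fun combos part => combos.flatMap (fun pre => kcl.map (fun c => pre ++ c ++ part))) [[]]
    combos.map (fun combo => String.ofList (parts.headD [] ++ combo))

-- ===== PRECONDITION & SPEC =====
-- Pre_ excludes the empty wildcard and inputs where the wildcard occurs in conditions but is
-- multi-character or contained in a replacement string: there A's repeated first-occurrence
-- replacement re-matches text it has itself produced (recursing forever, or re-replacing
-- across insertion boundaries), behaviour no positional replacement scheme would specify.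
def Pre_generate_replacements (conditions : String) (known_chars : List String) (wildcard_char : String) : Prop :=
  wildcard_char.toList ≠ [] ∧
    (PySem.Str.isIn wildcard_char conditions = false ∨
      (wildcard_char.toList.length = 1 ∧ ∀ c ∈ known_chars, PySem.Str.isIn wildcard_char c = false))
instance (conditions : String) (known_chars : List String) (wildcard_char : String) : Decidable (Pre_generate_replacements conditions known_chars wildcard_char) := by unfold Pre_generate_replacements; infer_instance
def pvWitness_generate_replacements : String × List String × String := ("a?b?", [".", "#"], "?")

def Spec_generate_replacements (conditions : String) (known_chars : List String) (wildcard_char : String) (out : List String) : Prop := out = generate_replacements_alt conditions known_chars wildcard_char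
instance (conditions : String) (known_chars : List String) (wildcard_char : String) (out : List String) : Decidable (Spec_generate_replacements conditions known_chars wildcard_char out) := by unfold Spec_generate_replacements; infer_instance

-- ===== CLAIM (what is proved, stated in full; the proofs are below) =====
def Claim_equal_generate_replacements : Prop := ∀ (conditions : String) (known_chars : List String) (wildcard_char : String), Dom_generate_replacements conditions known_chars wildcard_char → Pre_generate_replacements conditions known_chars wildcard_char → Spec_generate_replacements conditions known_chars wildcard_char (generate_replacements conditions known_chars wildcard_char)

-- ===== LEMMAS AND PROOFS =====

-- reference expansion: structural recursion over the characters
def pvExpand (kcl : List (List Char)) (w : Char) : List Char → List (List Char)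
  | [] => [[]]
  | c :: t =>
    if c = w then kcl.flatMap (fun k => (pvExpand kcl w t).map (k ++ ·))
    else (pvExpand kcl w t).map (c :: ·)

-- reference single-character split
def pvSplit (w : Char) : List Char → List (List Char)
  | [] => [[]]
  | c :: t =>
    if c = w then [] :: pvSplit w t
    else (c :: (pvSplit w t).headD []) :: (pvSplit w t).tail

-- B's inner fold step, named for the proofs (identical to the lambda in the port)
def pvStep (kcl : List (List Char)) (combos : List (List Char)) (part : List Char) : List (List Char) :=
  combos.flatMap (fun pre => kcl.map (fun c => pre ++ c ++ part))

theorem pvAlt_eq (conditions : String) (known_chars : List String) (wildcard_char : String)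
    (parts : List (List Char))
    (h : PySem.Chars.split? conditions.toList wildcard_char.toList = some parts) :
    generate_replacements_alt conditions known_chars wildcard_char
      = ((parts.drop 1).foldl (pvStep (known_chars.map String.toList)) [[]]).map
          (fun combo => String.ofList (parts.headD [] ++ combo)) := by
  unfold generate_replacements_alt
  rw [h]
  rfl

theorem pvSplit_ne_nil (w : Char) (s : List Char) : pvSplit w s ≠ [] := by
  cases s with
  | nil => simp [pvSplit]
  | cons c t => simp only [pvSplit]; split <;> simp

theorem pv_infix_single (w : Char) (s : List Char) : [w] <:+: s ↔ w ∈ s := by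
  constructor
  · intro h; exact h.subset (by simp)
  · intro h
    obtain ⟨p, r, rfl⟩ := List.append_of_mem h
    exact ⟨p, r, by simp⟩

theorem pv_first_split (w : Char) (s : List Char) (h : w ∈ s) :
    ∃ p r, s = p ++ w :: r ∧ w ∉ p := by
  induction s with
  | nil => simp at h
  | cons c t ih =>
    rcases eq_or_ne c w with rfl | hc
    · exact ⟨[], t, rfl, by simp⟩
    · have ht : w ∈ t := by
        rcases List.mem_cons.mp h with h1 | h1
        · exact absurd h1.symm hc
        · exact h1
      obtain ⟨p, r, hpr, hp⟩ := ih ht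
      refine ⟨c :: p, r, by simp [hpr], ?_⟩
      simp only [List.mem_cons, not_or]
      exact ⟨fun h1 => hc h1.symm, hp⟩

theorem pv_findgo_at (w : Char) (p r : List Char) (k : Nat) (hp : w ∉ p) :
    PySem.Chars.find.go [w] (p ++ w :: r) k = (k : Int) + p.length := by
  induction p generalizing k with
  | nil => simp [PySem.Chars.find.go, List.isPrefixOf]
  | cons c t ih =>
    have hc : (w == c) = false := by simp_all
    simp only [List.cons_append, PySem.Chars.find.go, List.isPrefixOf, hc, Bool.false_and,
      Bool.false_eq_true, if_false]
    rw [ih (k + 1) (by simp_all)]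
    simp only [List.length_cons]
    push_cast; ring

theorem pv_replace1_at (w : Char) (p r k : List Char) (hp : w ∉ p) :
    pvReplace1 (p ++ w :: r) [w] k = p ++ k ++ r := by
  have hf : PySem.Chars.find (p ++ w :: r) [w] = (p.length : Int) := by
    simpa using pv_findgo_at w p r 0 hp
  simp only [pvReplace1, hf]
  rw [if_neg (by omega)]
  have h1 : ((p.length : Int)).toNat = p.length := by simp
  rw [h1]
  have ht : (p ++ w :: r).take p.length = p := List.take_left
  have hd : (p ++ w :: r).drop (p.length + 1) = r := by
    rw [show p ++ w :: r = (p ++ [w]) ++ r from by simp]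
    exact List.drop_left' (by simp)
  simp only [List.length_cons, List.length_nil, Nat.zero_add, ht, hd]

theorem pvExpand_append (kcl : List (List Char)) (w : Char) (q u : List Char) (hq : w ∉ q) :
    pvExpand kcl w (q ++ u) = (pvExpand kcl w u).map (q ++ ·) := by
  induction q with
  | nil => simp
  | cons c t ih =>
    have h1 : ¬ w = c ∧ w ∉ t := by simpa using hq
    have hc : ¬ c = w := fun h => h1.1 h.symm
    simp only [List.cons_append, pvExpand, hc, if_false, ih h1.2]
    simp [List.map_map, Function.comp]

theorem pvExpand_nomem (kcl : List (List Char)) (w : Char) (s : List Char) (h : w ∉ s) :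
    pvExpand kcl w s = [s] := by
  have := pvExpand_append kcl w s [] h
  simpa [pvExpand] using this

theorem pvGoA_eq_expand (kcl : List (List Char)) (w : Char)
    (hkc : ∀ k ∈ kcl, w ∉ k) :
    ∀ fuel s, s.count w < fuel → pvGoA kcl [w] fuel s = pvExpand kcl w s := by
  intro fuel
  induction fuel with
  | zero => intro s h; omega
  | succ fuel ih =>
    intro s hcnt
    by_cases hmem : w ∈ s
    · have hin : PySem.Chars.isIn [w] s = true := by
        rw [PySem.Chars.isIn_iff_infix, pv_infix_single]; exact hmem
      obtain ⟨p, r, rfl, hp⟩ := pv_first_split w s hmem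
      simp only [pvGoA, hin, Bool.true_eq_false, if_false]
      rw [PySem.List.foldl_append_eq_flatMap]
      simp only [List.nil_append]
      have hstep : ∀ k ∈ kcl,
          pvGoA kcl [w] fuel (pvReplace1 (p ++ w :: r) [w] k) = pvExpand kcl w (p ++ k ++ r) := by
        intro k hk
        rw [pv_replace1_at w p r k hp]
        apply ih
        have h1 : (p ++ k ++ r).count w < (p ++ w :: r).count w := by
          simp [List.count_append, List.count_eq_zero.mpr hp,
            List.count_eq_zero.mpr (hkc k hk)]
        omega
      rw [List.flatMap_congr hstep]
      have hright : ∀ k ∈ kcl,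
          pvExpand kcl w (p ++ k ++ r) = ((pvExpand kcl w r).map (k ++ ·)).map (p ++ ·) := by
        intro k hk
        rw [List.append_assoc, pvExpand_append kcl w p _ hp,
          pvExpand_append kcl w k r (hkc k hk)]
      rw [List.flatMap_congr hright]
      rw [pvExpand_append kcl w p _ hp]
      simp [pvExpand, List.map_flatMap, List.map_map, Function.comp_def]
    · have hin : PySem.Chars.isIn [w] s = false := by
        rw [PySem.Chars.isIn_eq_false_iff, pv_infix_single]; exact hmem
      simp only [pvGoA, hin, if_pos]
      exact (pvExpand_nomem kcl w s hmem).symm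

-- splitOn s [w] is pvSplit
theorem pv_go_split (w : Char) (l : List Char) :
    ∀ (fuel : Nat), l.length ≤ fuel → ∀ (cur : List Char) (acc : List (List Char)),
    PySem.Chars.splitOn.go [w] fuel l cur acc
      = acc.reverse ++ ((cur.reverse ++ (pvSplit w l).headD []) :: (pvSplit w l).tail) := by
  induction l with
  | nil =>
    intro fuel _ cur acc
    cases fuel <;> simp [PySem.Chars.splitOn.go, pvSplit]
  | cons c t ih =>
    intro fuel hf cur acc
    obtain ⟨f, rfl⟩ : ∃ f, fuel = f + 1 := ⟨fuel - 1, by simp at hf; omega⟩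
    have hft : t.length ≤ f := by simp at hf; omega
    rcases eq_or_ne c w with rfl | hc
    · have hpre : [c].isPrefixOf (c :: t) = true := by simp [List.isPrefixOf]
      simp only [PySem.Chars.splitOn.go, hpre, if_true, List.length_cons, List.length_nil,
        List.drop_succ_cons, List.drop_zero]
      rw [ih f hft [] (cur.reverse :: acc)]
      have hne := pvSplit_ne_nil c t
      cases hsp : pvSplit c t with
      | nil => exact absurd hsp hne
      | cons a l' => simp [pvSplit, hsp]
    · have hwc : (w == c) = false := beq_eq_false_iff_ne.mpr (Ne.symm hc)
      have hpre : [w].isPrefixOf (c :: t) = false := by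
        simp [List.isPrefixOf, hwc]
      simp only [PySem.Chars.splitOn.go, hpre, Bool.false_eq_true, if_false]
      rw [ih f hft (c :: cur) acc]
      have hne := pvSplit_ne_nil w t
      cases hsp : pvSplit w t with
      | nil => exact absurd hsp hne
      | cons a l' => simp [pvSplit, hsp, hc]

theorem pv_splitOn_single (w : Char) (s : List Char) :
    PySem.Chars.splitOn s [w] = pvSplit w s := by
  unfold PySem.Chars.splitOn
  rw [pv_go_split w s (s.length + 1) (by omega) [] []]
  have hne := pvSplit_ne_nil w s
  cases hsp : pvSplit w s with
  | nil => exact absurd hsp hne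
  | cons a l' => simp

-- splitOn when the separator does not occur: one piece
theorem pv_go_noinfix (sep : List Char) (l : List Char) :
    ∀ (fuel : Nat), l.length ≤ fuel → ¬ sep <:+: l → ∀ cur acc,
    PySem.Chars.splitOn.go sep fuel l cur acc = acc.reverse ++ [cur.reverse ++ l] := by
  induction l with
  | nil =>
    intro fuel _ _ cur acc
    cases fuel <;> simp [PySem.Chars.splitOn.go]
  | cons c t ih =>
    intro fuel hf hni cur acc
    obtain ⟨f, rfl⟩ : ∃ f, fuel = f + 1 := ⟨fuel - 1, by simp at hf; omega⟩
    have hft : t.length ≤ f := by simp at hf; omega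
    have hpre : sep.isPrefixOf (c :: t) = false := by
      by_contra h
      have : sep <+: c :: t := List.isPrefixOf_iff_prefix.mp (by simpa using h)
      exact hni this.isInfix
    simp only [PySem.Chars.splitOn.go, hpre, Bool.false_eq_true, if_false]
    rw [ih f hft (fun h => hni (h.trans (List.suffix_cons c t).isInfix)) (c :: cur) acc]
    simp

theorem pv_splitOn_noinfix (sep s : List Char) (h : ¬ sep <:+: s) :
    PySem.Chars.splitOn s sep = [s] := by
  unfold PySem.Chars.splitOn
  rw [pv_go_noinfix sep s (s.length + 1) (by omega) h [] []]
  simp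

-- distribution of the fold over the seed
theorem pvFold_nil (kcl : List (List Char)) (tl : List (List Char)) :
    tl.foldl (pvStep kcl) [] = [] := by
  induction tl with
  | nil => rfl
  | cons p tl ih => simpa [pvStep] using ih

theorem pvFold_append (kcl : List (List Char)) (tl : List (List Char)) :
    ∀ xs ys, tl.foldl (pvStep kcl) (xs ++ ys)
      = tl.foldl (pvStep kcl) xs ++ tl.foldl (pvStep kcl) ys := by
  induction tl with
  | nil => intro xs ys; rfl
  | cons p tl ih =>
    intro xs ys
    simp only [List.foldl_cons]
    rw [show pvStep kcl (xs ++ ys) p = pvStep kcl xs p ++ pvStep kcl ys p by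
      simp [pvStep]]
    exact ih _ _

theorem pvFold_map (kcl : List (List Char)) (tl : List (List Char)) :
    ∀ (xs : List (List Char)) (q : List Char),
      tl.foldl (pvStep kcl) (xs.map (q ++ ·))
        = (tl.foldl (pvStep kcl) xs).map (q ++ ·) := by
  induction tl with
  | nil => intro xs q; rfl
  | cons p tl ih =>
    intro xs q
    simp only [List.foldl_cons]
    rw [show pvStep kcl (xs.map (q ++ ·)) p = (pvStep kcl xs p).map (q ++ ·) by
      simp [pvStep, List.flatMap_map, List.map_flatMap, List.map_map, Function.comp_def,
        List.append_assoc]]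
    exact ih _ _

theorem pvFold_flatMap (kcl : List (List Char)) (tl : List (List Char))
    (g : List Char → List (List Char)) :
    ∀ (xs : List (List Char)),
      tl.foldl (pvStep kcl) (xs.flatMap g)
        = xs.flatMap (fun x => tl.foldl (pvStep kcl) (g x)) := by
  intro xs
  induction xs with
  | nil => simp [pvFold_nil]
  | cons x xs ih =>
    simp only [List.flatMap_cons]
    rw [pvFold_append, ih]

theorem pvB_eq_expand (kcl : List (List Char)) (w : Char) (s : List Char) :
    (((pvSplit w s).drop 1).foldl (pvStep kcl) [[]]).map ((pvSplit w s).headD [] ++ ·)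
      = pvExpand kcl w s := by
  induction s with
  | nil => simp [pvSplit, pvExpand]
  | cons c t ih =>
    have hne := pvSplit_ne_nil w t
    cases hsp : pvSplit w t with
    | nil => exact absurd hsp hne
    | cons h0 tl =>
      rw [hsp] at ih
      simp only [List.drop_succ_cons, List.drop_zero, List.headD_cons] at ih
      rcases eq_or_ne c w with rfl | hc
      · simp only [pvSplit, if_true, hsp, List.drop_succ_cons, List.drop_zero,
          List.headD_cons, List.foldl_cons]
        have h1 : pvStep kcl [[]] h0 = kcl.flatMap (fun k => [k ++ h0]) := by
          simp only [pvStep, List.flatMap_cons, List.flatMap_nil, List.append_nil,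
            List.nil_append]
          exact List.map_eq_flatMap
        rw [h1, pvFold_flatMap]
        simp only [pvExpand, if_true]
        rw [← ih, List.map_flatMap]
        congr 1
        funext k
        have h2 := pvFold_map kcl tl [[]] (k ++ h0)
        simp only [List.map_cons, List.map_nil, List.append_nil] at h2
        rw [h2]
        simp [List.map_map, Function.comp_def, List.append_assoc]
      · simp only [pvSplit, if_neg hc, hsp, List.headD_cons, List.tail_cons,
          List.drop_succ_cons, List.drop_zero]
        simp only [pvExpand, if_neg hc]
        rw [← ih]
        simp [List.map_map, Function.comp_def]

theorem pv_notmem_of_isIn_false (s : List Char) (w : Char)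
    (h : PySem.Chars.isIn [w] s = false) : w ∉ s := by
  rw [PySem.Chars.isIn_eq_false_iff, pv_infix_single] at h
  exact h

-- ===== VERDICT (by name: the statement is the Claim_ definition above) =====
theorem generate_replacements_spec : Claim_equal_generate_replacements := by
  intro conds kc wc _ hpre
  obtain ⟨hne, hcase⟩ := hpre
  have hsplit? : PySem.Chars.split? conds.toList wc.toList
      = some (PySem.Chars.splitOn conds.toList wc.toList) := by
    simp [PySem.Chars.split?, List.isEmpty_iff, hne]
  unfold Spec_generate_replacements generate_replacements
  rcases hcase with hni | ⟨hlen, hkc⟩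
  · -- wildcard does not occur: both sides are [conditions]
    have hni' : PySem.Chars.isIn wc.toList conds.toList = false := by
      simpa using hni
    have hno : ¬ wc.toList <:+: conds.toList := by
      rw [← PySem.Chars.isIn_eq_false_iff]; exact hni'
    rw [pvAlt_eq conds kc wc [conds.toList]
      (by rw [hsplit?, pv_splitOn_noinfix _ _ hno])]
    simp [pvGoA, hni', String.ofList_toList]
  · -- single-character wildcard, replacements wildcard-free
    obtain ⟨w, hw⟩ : ∃ w, wc.toList = [w] := by
      cases hwl : wc.toList with
      | nil => exact absurd hwl hne
      | cons a l =>
        rw [hwl] at hlen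
        simp at hlen
        exact ⟨a, by simp [hlen]⟩
    have hkc' : ∀ k ∈ kc.map String.toList, w ∉ k := by
      intro k hk
      obtain ⟨c, hc, rfl⟩ := List.mem_map.mp hk
      apply pv_notmem_of_isIn_false
      rw [← hw]
      simpa using hkc c hc
    rw [pvAlt_eq conds kc wc (pvSplit w conds.toList)
      (by rw [hsplit?, hw, pv_splitOn_single])]
    rw [hw, pvGoA_eq_expand _ w hkc' _ _ (by
      have := List.count_le_length (l := conds.toList) (a := w)
      omega)]
    rw [← pvB_eq_expand (kc.map String.toList) w conds.toList]
    simp [List.map_map, Function.comp_def]
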